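-- pv_equiv track=rewrite | github.com/Nohait/AOC-2024 | day9pb2.py | space
-- ===== SOURCE A (Python) =====
-- def space(s,size,m) :
--     crt = 0
--     for i in range(0,m) :
--         if s[i] == '.' :
--             crt += 1
--             if crt == size :
--                 return i + 1 - crt
--         else :
--             crt = 0
--         i += 1
--     return None
-- ===== SOURCE B (Python) =====
-- def space(s, size, m):
--     if size <= 0 or m <= 0:
--         return None
--     chars = ''.join('.' if x == '.' else 'x' for x in s[:m])
--     if size > len(chars):
--         return None
--     r = chars.find('.' * size)
--     return None if r == -1 else r
-- ===== Notes on version B (the rewrite author's own statement) =====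
-- stated objective: idiomatic
-- what changed: Replaces A's manual consecutive-dot counter loop with building a characteristic string of the first m cells and delegating the search to str.find of '.'*size.
-- outside the precondition, e.g. on space(['.'], 1, 5): A returns 0, B returns 0
import Mathlib
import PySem

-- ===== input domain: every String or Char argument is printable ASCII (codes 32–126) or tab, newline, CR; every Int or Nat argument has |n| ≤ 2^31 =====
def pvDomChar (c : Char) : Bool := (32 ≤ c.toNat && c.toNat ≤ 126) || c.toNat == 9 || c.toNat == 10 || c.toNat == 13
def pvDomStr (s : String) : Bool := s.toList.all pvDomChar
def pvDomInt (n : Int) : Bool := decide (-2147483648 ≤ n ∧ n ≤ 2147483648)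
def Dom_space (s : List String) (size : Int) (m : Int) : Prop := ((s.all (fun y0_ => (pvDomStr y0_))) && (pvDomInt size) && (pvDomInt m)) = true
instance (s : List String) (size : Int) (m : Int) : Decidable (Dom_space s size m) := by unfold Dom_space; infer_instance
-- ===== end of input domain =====

-- B replaces A's manual consecutive-dot counter loop with a characteristic string searched by str.find (idiomatic, same cost).

-- ===== PORT A =====
-- literal port of A's loop: i runs over range(0, m) (m.toNat iterations), crt is the running dot counter;
-- s[i] is PySem.List.pyGet? (where Python raises IndexError the port's comparison to some "." is simply false — outside Pre_)
def spaceGo (s : List String) (size : Int) (i : Nat) (crt : Int) : Nat → Option Int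
  | 0 => none
  | Nat.succ n =>
    if PySem.List.pyGet? s (i : Int) = some "." then
      if crt + 1 = size then some ((i : Int) + 1 - (crt + 1))
      else spaceGo s size (i + 1) (crt + 1) n
    else spaceGo s size (i + 1) 0 n

def space (s : List String) (size : Int) (m : Int) : Option Int :=
  spaceGo s size 0 0 m.toNat

-- ===== PORT B =====
-- port of Source B: the joined characteristic string is the List Char 'chars'; str.find is PySem.Chars.find; '.'*size is List.replicate
def space_alt (s : List String) (size : Int) (m : Int) : Option Int :=
  if size ≤ 0 ∨ m ≤ 0 then none
  else
    let chars : List Char := (PySem.List.slice s none (some m)).map (fun x => if x = "." then '.' else 'x')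
    if (chars.length : Int) < size then none
    else
      let r := PySem.Chars.find chars (List.replicate size.toNat '.')
      if r = -1 then none else some r

-- ===== PRECONDITION & SPEC =====
-- Pre_ excludes m > len(s): there A indexes past the end and raises IndexError whenever no run of
-- size dots completes inside s (when a run does complete early A returns and agrees with B — see cites/Raises_).
def Pre_space (s : List String) (size : Int) (m : Int) : Prop := m ≤ (s.length : Int)
instance (s : List String) (size : Int) (m : Int) : Decidable (Pre_space s size m) := by unfold Pre_space; infer_instance
def pvWitness_space : List String × Int × Int := (["x", ".", "."], 2, 3)

def Spec_space (s : List String) (size : Int) (m : Int) (out : Option Int) : Prop := out = space_alt s size m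
instance (s : List String) (size : Int) (m : Int) (out : Option Int) : Decidable (Spec_space s size m out) := by unfold Spec_space; infer_instance

-- ===== CLAIM (what is proved, stated in full; the proofs are below) =====
def Claim_equal_space : Prop := ∀ (s : List String) (size : Int) (m : Int), Dom_space s size m → Pre_space s size m → Spec_space s size m (space s size m)

-- ===== LEMMAS AND PROOFS =====

-- the run predicate: sz consecutive "." cells starting at j
def Dots (s : List String) (sz j : Nat) : Prop := ∀ k < sz, s[j + k]? = some "."

-- bridge: the target is a prefix of chars.drop j  ↔  a run of sz dots starts at j within the first mN cells
theorem prefix_iff_run (s : List String) (szN mN j : Nat) (hsz1 : 1 ≤ szN) (hm : mN ≤ s.length) :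
    List.replicate szN '.' <+: ((s.take mN).map (fun x => if x = "." then '.' else 'x')).drop j
      ↔ (j + szN ≤ mN ∧ Dots s szN j) := by
  set f : String → Char := fun x => if x = "." then '.' else 'x' with hf
  have hidx : ∀ p, (hp : p < mN) → ((s.take mN).map f)[p]? = some (f (s[p]'(by omega))) := by
    intro p hp
    simp [List.getElem?_map, List.getElem?_take_of_lt hp, List.getElem?_eq_getElem (show p < s.length by omega)]
  rw [List.prefix_iff_eq_take]
  simp only [List.length_replicate]
  constructor
  · intro heq
    have hl : szN ≤ min mN s.length - j := by
      have := congrArg List.length heq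
      simpa [List.length_take, List.length_drop] using this
    have hjm : j + szN ≤ mN := by omega
    refine ⟨hjm, fun k hk => ?_⟩
    have h1 : (List.replicate szN '.')[k]? = some '.' := by simp [hk]
    rw [heq] at h1
    rw [List.getElem?_take_of_lt hk, List.getElem?_drop, hidx (j+k) (by omega)] at h1
    rw [List.getElem?_eq_getElem (show j + k < s.length by omega)]
    by_cases hd : s[j+k] = "."
    · rw [hd]
    · simp [hf, hd] at h1
  · rintro ⟨hjm, hdots⟩
    apply List.ext_getElem?
    intro n
    by_cases hn : n < szN
    · rw [List.getElem?_take_of_lt hn, List.getElem?_drop, hidx (j+n) (by omega)]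
      have := hdots n hn
      rw [List.getElem?_eq_getElem (show j + n < s.length by omega)] at this
      simp only [List.getElem?_replicate, hn, if_true]
      simp [hf, Option.some_inj.mp this]
    · rw [List.getElem?_eq_none_iff.mpr (by simpa using hn), eq_comm, List.getElem?_eq_none_iff]
      simp [List.length_take]
      omega

-- the counter can never hit a non-positive size
theorem go_nonpos (s : List String) (size : Int) (hsz : size ≤ 0) :
    ∀ (n i : Nat) (crt : Int), 0 ≤ crt → spaceGo s size i crt n = none := by
  intro n
  induction n with
  | zero => intro i crt _; rfl
  | succ n ih =>
    intro i crt hc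
    rw [spaceGo]
    split
    · rw [if_neg (by omega)]
      exact ih (i+1) (crt+1) (by omega)
    · exact ih (i+1) 0 le_rfl

-- A's loop returns none when there is no run; invariant: crt counts the dots ending just before i
theorem go_none (s : List String) (size : Int) (szN mN : Nat)
    (hsz : size = (szN : Int)) (hsz1 : 1 ≤ szN) (hm : mN ≤ s.length)
    (hno : ∀ j, ¬ (j + szN ≤ mN ∧ Dots s szN j)) :
    ∀ (n i : Nat) (crt : Int) (cN : Nat), i + n = mN → crt = (cN : Int) → cN < szN → cN ≤ i →
      (∀ t < cN, s[(i - cN) + t]? = some ".") →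
      spaceGo s size i crt n = none := by
  intro n
  induction n with
  | zero => intro i crt cN _ _ _ _ _; rfl
  | succ n ih =>
    intro i crt cN hi hcrt hlt hle hdots
    have hilen : i < s.length := by omega
    rw [spaceGo, PySem.List.pyGet?_natCast, List.getElem?_eq_getElem hilen]
    by_cases hd : s[i] = "."
    · rw [if_pos (by rw [hd])]
      have hrun : ¬ crt + 1 = size := by
        intro he
        have hcs : cN + 1 = szN := by omega
        refine hno (i - cN) ⟨by omega, fun k hk => ?_⟩
        rcases Nat.lt_or_ge k cN with h | h
        · exact hdots k h
        · rw [(by omega : k = cN), (by omega : i - cN + cN = i),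
              List.getElem?_eq_getElem hilen, hd]
      rw [if_neg hrun]
      refine ih (i+1) (crt+1) (cN+1) (by omega) (by omega) ?_ (by omega) ?_
      · have : (cN : Int) + 1 ≠ (szN : Int) := by rw [← hcrt, ← hsz]; intro he; exact hrun (by omega)
        omega
      · intro t ht
        rw [(by omega : i + 1 - (cN + 1) = i - cN)]
        rcases Nat.lt_or_ge t cN with h | h
        · exact hdots t h
        · rw [(by omega : t = cN), (by omega : i - cN + cN = i), List.getElem?_eq_getElem hilen, hd]
    · rw [if_neg (fun h => hd (Option.some_inj.mp h))]
      exact ih (i+1) 0 0 (by omega) rfl (by omega) (by omega) (by omega)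

-- A's loop returns the first run start when one exists; extra invariants: the counted run is maximal,
-- and no run of szN dots ends at or before i
theorem go_some (s : List String) (size : Int) (szN mN j₀ : Nat)
    (hsz : size = (szN : Int)) (hsz1 : 1 ≤ szN) (hm : mN ≤ s.length)
    (hrun : j₀ + szN ≤ mN ∧ Dots s szN j₀) (hmin : ∀ j < j₀, ¬ (j + szN ≤ mN ∧ Dots s szN j)) :
    ∀ (n i : Nat) (crt : Int) (cN : Nat), i + n = mN → crt = (cN : Int) → cN < szN → cN ≤ i →
      (∀ t < cN, s[(i - cN) + t]? = some ".") →
      (cN = i ∨ s[i - cN - 1]? ≠ some ".") →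
      (∀ j, j + szN ≤ i → ¬ Dots s szN j) →
      spaceGo s size i crt n = some (j₀ : Int) := by
  intro n
  induction n with
  | zero =>
    intro i crt cN hi _ _ _ _ _ hnorun
    exact absurd hrun.2 (hnorun j₀ (by omega))
  | succ n ih =>
    intro i crt cN hi hcrt hlt hle hdots hmax hnorun
    have hilen : i < s.length := by omega
    rw [spaceGo, PySem.List.pyGet?_natCast, List.getElem?_eq_getElem hilen]
    by_cases hd : s[i] = "."
    · rw [if_pos (by rw [hd])]
      by_cases he : crt + 1 = size
      · rw [if_pos he]
        have hcs : cN + 1 = szN := by omega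
        have hrunHere : (i - cN) + szN ≤ mN ∧ Dots s szN (i - cN) := by
          refine ⟨by omega, fun k hk => ?_⟩
          rcases Nat.lt_or_ge k cN with h | h
          · exact hdots k h
          · rw [(by omega : k = cN), (by omega : i - cN + cN = i),
                List.getElem?_eq_getElem hilen, hd]
        have hj₀ : j₀ = i - cN := by
          rcases Nat.lt_trichotomy j₀ (i - cN) with h | h | h
          · exact absurd hrun.2 (hnorun j₀ (by omega))
          · exact h
          · exact absurd hrunHere (hmin (i - cN) h)
        rw [hj₀]
        congr 1
        omega
      · rw [if_neg he]
        have hlt' : cN + 1 < szN := by omega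
        refine ih (i+1) (crt+1) (cN+1) (by omega) (by omega) hlt' (by omega) ?_ ?_ ?_
        · intro t ht
          rw [(by omega : i + 1 - (cN + 1) = i - cN)]
          rcases Nat.lt_or_ge t cN with h | h
          · exact hdots t h
          · rw [(by omega : t = cN), (by omega : i - cN + cN = i),
                List.getElem?_eq_getElem hilen, hd]
        · rcases hmax with h | h
          · exact Or.inl (by omega)
          · right; rw [(by omega : i + 1 - (cN + 1) - 1 = i - cN - 1)]; exact h
        · intro j hj hdj
          rcases Nat.lt_or_ge (j + szN) (i + 1) with h | h
          · exact hnorun j (by omega) hdj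
          · have hji : j + szN = i + 1 := by omega
            rcases hmax with hmx | hmx
            · omega
            · have := hdj (i - cN - 1 - j) (by omega)
              rw [(by omega : j + (i - cN - 1 - j) = i - cN - 1)] at this
              exact hmx this
    · rw [if_neg (fun h => hd (Option.some_inj.mp h))]
      refine ih (i+1) 0 0 (by omega) rfl (by omega) (by omega) (by omega) ?_ ?_
      · right
        rw [(by omega : i + 1 - 0 - 1 = i), List.getElem?_eq_getElem hilen]
        exact fun h => hd (Option.some_inj.mp h)
      · intro j hj hdj
        rcases Nat.lt_or_ge (j + szN) (i + 1) with h | h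
        · exact hnorun j (by omega) hdj
        · have := hdj (szN - 1) (by omega)
          rw [(by omega : j + (szN - 1) = i), List.getElem?_eq_getElem hilen] at this
          exact hd (Option.some_inj.mp this)

theorem space_spec' (s : List String) (size : Int) (m : Int) (hpre : m ≤ (s.length : Int)) :
    space s size m = space_alt s size m := by
  by_cases hsz0 : size ≤ 0
  · rw [space_alt, if_pos (Or.inl hsz0), space, go_nonpos s size hsz0 _ _ _ le_rfl]
  by_cases hm0 : m ≤ 0
  · rw [space_alt, if_pos (Or.inr hm0), space, (by omega : m.toNat = 0)]
    rfl
  replace hsz0 : 0 < size := by omega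
  replace hm0 : 0 < m := by omega
  set szN := size.toNat with hszN
  set mN := m.toNat with hmN
  have hsz : size = (szN : Int) := by omega
  have hsz1 : 1 ≤ szN := by omega
  have hm : mN ≤ s.length := by omega
  rw [space_alt, if_neg (by omega)]
  simp only [PySem.List.slice_to s (show (0:Int) ≤ m by omega)]
  set f : String → Char := fun x => if x = "." then '.' else 'x' with hf
  set chars : List Char := (s.take mN).map f with hchars
  have hclen : chars.length = mN := by simp [hchars, List.length_take]; omega
  by_cases hbig : (chars.length : Int) < size
  · rw [if_pos hbig]
    have hno : ∀ j, ¬ (j + szN ≤ mN ∧ Dots s szN j) := by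
      intro j ⟨h1, _⟩; omega
    simp only [space]
    exact go_none s size szN mN hsz hsz1 hm hno mN 0 0 0 (by omega) rfl (by omega) le_rfl (by omega)
  · rw [if_neg hbig]
    set r := PySem.Chars.find chars (List.replicate szN '.') with hr
    by_cases hneg : r = -1
    · rw [if_pos hneg]
      have hninf : ¬ (List.replicate szN '.') <:+: chars := (PySem.Chars.find_eq_neg_one_iff _ _).mp hneg
      have hno : ∀ j, ¬ (j + szN ≤ mN ∧ Dots s szN j) := by
        intro j hj
        have hpre' : (List.replicate szN '.') <+: chars.drop j := (prefix_iff_run s szN mN j hsz1 hm).mpr hj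
        have : PySem.Chars.isIn (List.replicate szN '.') chars = true :=
          (PySem.Chars.exists_prefix_drop_iff_isIn _ _).mp ⟨j, hpre'⟩
        exact hninf ((PySem.Chars.isIn_iff_infix _ _).mp this)
      simp only [space]
      exact go_none s size szN mN hsz hsz1 hm hno mN 0 0 0 (by omega) rfl (by omega) le_rfl (by omega)
    · rw [if_neg hneg]
      have hr0 : 0 ≤ r := by have := PySem.Chars.neg_one_le_find chars (List.replicate szN '.'); omega
      obtain ⟨hpre', hmin'⟩ := PySem.Chars.find_spec (s := chars) (sub := List.replicate szN '.') hr0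
      rw [← hr] at hpre' hmin'
      have hrun : r.toNat + szN ≤ mN ∧ Dots s szN r.toNat := (prefix_iff_run s szN mN r.toNat hsz1 hm).mp hpre'
      have hmin : ∀ j < r.toNat, ¬ (j + szN ≤ mN ∧ Dots s szN j) := by
        intro j hj hcontra
        exact hmin' j hj ((prefix_iff_run s szN mN j hsz1 hm).mpr hcontra)
      have := go_some s size szN mN r.toNat hsz hsz1 hm hrun hmin mN 0 0 0 (by omega) rfl (by omega) le_rfl (by omega) (Or.inl rfl) (by omega)
      simp only [space]
      rw [this, Int.toNat_of_nonneg hr0]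

-- ===== VERDICT (by name: the statement is the Claim_ definition above) =====
theorem space_spec : Claim_equal_space := by
  intro s size m _ hpre
  exact space_spec' s size m hpre
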